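-- pv_equiv track=rewrite | github.com/Umka1989/6_password_strength | password_strength.py | rate_for_special_symbols
-- ===== SOURCE A (Python) =====
-- def rate_for_special_symbols(password):
--     count_of_special_symbols = sum(
--         1 for symbol in password if symbol.isalnum())
--     if count_of_special_symbols in range(len(password)):
--         return 2
--     elif count_of_special_symbols > 0:
--         return 1
--     else:
--         return 0
-- ===== SOURCE B (Python) =====
-- def rate_for_special_symbols(password):
--     if not password:
--         return 0
--     if all(symbol.isalnum() for symbol in password):
--         return 1
--     return 2
-- ===== Notes on version B (the rewrite author's own statement) =====
-- stated objective: simpler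
-- what changed: B keeps no counter: it handles the empty password explicitly, then decides by a short-circuiting all-alnum predicate instead of summing alnum characters and testing the sum against range(len).
import Mathlib
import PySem

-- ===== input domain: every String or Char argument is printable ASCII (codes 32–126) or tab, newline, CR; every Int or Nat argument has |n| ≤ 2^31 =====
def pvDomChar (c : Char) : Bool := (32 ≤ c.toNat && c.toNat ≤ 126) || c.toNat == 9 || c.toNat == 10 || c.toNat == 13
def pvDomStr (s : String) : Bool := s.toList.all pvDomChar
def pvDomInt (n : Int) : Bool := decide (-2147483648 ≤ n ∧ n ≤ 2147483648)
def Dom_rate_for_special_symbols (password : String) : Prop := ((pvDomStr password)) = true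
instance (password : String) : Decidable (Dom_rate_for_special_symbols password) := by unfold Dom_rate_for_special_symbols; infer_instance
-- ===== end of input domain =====

-- B replaces A's alnum counter compared against range(len) by an explicit empty check and a
-- short-circuiting all-alnum test (simpler decomposition, no counter).

-- ===== PORT A =====
-- sum(1 for symbol in password if symbol.isalnum())
def rate_for_special_symbols (password : String) : Int :=
  let count_of_special_symbols : Int :=
    password.toList.foldl (fun acc symbol => if PySem.Chars.isalnum symbol then acc + 1 else acc) 0
  -- 'count in range(len(password))' is 0 ≤ count < len
  if 0 ≤ count_of_special_symbols ∧ count_of_special_symbols < (password.toList.length : Int) then 2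
  else if count_of_special_symbols > 0 then 1
  else 0

-- ===== PORT B =====
def rate_for_special_symbols_alt (password : String) : Int :=
  if password.toList.isEmpty then 0
  else if password.toList.all PySem.Chars.isalnum then 1
  else 2

-- ===== PRECONDITION & SPEC =====
def Spec_rate_for_special_symbols (password : String) (out : Int) : Prop := out = rate_for_special_symbols_alt password
instance (password : String) (out : Int) : Decidable (Spec_rate_for_special_symbols password out) := by unfold Spec_rate_for_special_symbols; infer_instance

-- ===== CLAIM (what is proved, stated in full; the proofs are below) =====
def Claim_equal_rate_for_special_symbols : Prop := ∀ (password : String), Dom_rate_for_special_symbols password → Spec_rate_for_special_symbols password (rate_for_special_symbols password)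

-- ===== LEMMAS AND PROOFS =====

theorem pv_count_eq (l : List Char) (init : Int) :
    l.foldl (fun acc symbol => if PySem.Chars.isalnum symbol then acc + 1 else acc) init
      = init + (l.countP PySem.Chars.isalnum : Int) := by
  induction l generalizing init with
  | nil => simp
  | cons c t ih =>
    simp only [List.foldl_cons, List.countP_cons, ih]
    by_cases h : PySem.Chars.isalnum c = true <;> simp [h] <;> ring

-- ===== VERDICT (by name: the statement is the Claim_ definition above) =====
theorem rate_for_special_symbols_spec : Claim_equal_rate_for_special_symbols := by
  intro password _
  unfold Spec_rate_for_special_symbols rate_for_special_symbols rate_for_special_symbols_alt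
  simp only [pv_count_eq, zero_add]
  set l := password.toList with hl
  have hle : l.countP PySem.Chars.isalnum ≤ l.length := List.countP_le_length
  by_cases hemp : l.isEmpty
  · rw [List.isEmpty_iff] at hemp
    simp [hemp]
  · rw [List.isEmpty_iff] at hemp
    have hlen : 0 < l.length := List.length_pos_iff.mpr hemp
    by_cases hall : l.all PySem.Chars.isalnum
    · have : l.countP PySem.Chars.isalnum = l.length := by
        rw [List.countP_eq_length]
        intro a ha; exact List.all_eq_true.mp hall a ha
      simp [hemp, hall, this]
    · have hne : l.countP PySem.Chars.isalnum ≠ l.length := by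
        intro h
        exact hall (List.all_eq_true.mpr (List.countP_eq_length.mp h))
      have : (l.countP PySem.Chars.isalnum : Int) < (l.length : Int) := by
        exact_mod_cast lt_of_le_of_ne hle hne
      simp [hemp, hall]
      split_ifs
      all_goals intro hfa; exact absurd (List.all_eq_true.mpr hfa) hall
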